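-- pv_equiv track=rewrite | github.com/leejinwon012/Algorithm_practice | 프로그래머스/0/181855. 문자열 묶기/문자열 묶기.py | solution
-- ===== SOURCE A (Python) =====
-- def solution(strArr):
--     # 문자열 길이를 카운트할 딕셔너리 생성
--     length_counts = {}
--
--     # 각 문자열의 길이를 카운트
--     for s in strArr:
--         length = len(s)
--         if length in length_counts:
--             length_counts[length] += 1
--         else:
--             length_counts[length] = 1
--
--     # 문자열 길이의 최댓값 찾기
--     max_length = max(length_counts, key=length_counts.get)
--
--     # 최댓값에 해당하는 문자열 개수 반환
--     max_group_size = length_counts[max_length]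
--
--     return max_group_size
-- ===== SOURCE B (Python) =====
-- def solution(strArr):
--     # Recursive divide-by-value: take the first length, count its group by
--     # filtering it out, and recurse on what remains; no dict/counter is built.
--     def best(xs):
--         v = xs[0]
--         rest = [x for x in xs if x != v]
--         c = len(xs) - len(rest)
--         return c if not rest else max(c, best(rest))
--     return best([len(s) for s in strArr])
-- ===== Notes on version B (the rewrite author's own statement) =====
-- stated objective: alternative
-- what changed: B replaces A's dict counter plus argmax-key lookup with a recursive divide-by-value scheme: take the first length, measure its group size by filtering it out, recurse on the remainder, and combine with max.
import Mathlib
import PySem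

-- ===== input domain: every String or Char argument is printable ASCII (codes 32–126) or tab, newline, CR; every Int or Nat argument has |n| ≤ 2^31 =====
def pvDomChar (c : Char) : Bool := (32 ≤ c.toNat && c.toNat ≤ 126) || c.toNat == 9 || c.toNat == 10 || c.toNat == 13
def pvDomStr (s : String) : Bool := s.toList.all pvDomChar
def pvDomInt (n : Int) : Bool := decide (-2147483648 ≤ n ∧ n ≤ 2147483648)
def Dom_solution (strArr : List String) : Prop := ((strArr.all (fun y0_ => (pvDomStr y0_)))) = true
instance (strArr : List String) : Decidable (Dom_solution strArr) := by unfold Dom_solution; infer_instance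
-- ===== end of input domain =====

-- B replaces A's counting dict + argmax-key lookup by a recursive divide-by-value
-- scheme (count the first length's group by filtering it out, recurse on the rest,
-- combine with max); equivalence of the RETURN value on nonempty input.

-- ===== PORT A =====
def solution (strArr : List String) : Int :=
  let d := strArr.foldl (fun d s =>
      let length : Int := PySem.Str.len s
      if d.contains length then d.insert length (d.getD length 0 + 1)
      else d.insert length 1) PySem.Dict.empty
  -- max(length_counts, key=length_counts.get); on an empty dict Python raises ValueError (excluded by Pre_)
  match PySem.List.max? d.keys (fun k => d.getD k 0) with
  | some m => d.getD m 0
  | none => 0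

-- ===== PORT B =====
-- best(xs): xs[0] raises IndexError on []; [] is excluded by Pre_, 0 is the off-domain value.
def bestRun : List Int → Int
  | [] => 0
  | v :: t =>
    let rest := (v :: t).filter (fun x => decide (x ≠ v))
    let c : Int := ((v :: t).length : Int) - (rest.length : Int)
    if rest = [] then c else max c (bestRun rest)
termination_by xs => xs.length
decreasing_by
  simp only [List.filter_cons, decide_not, ne_eq, List.length_cons]
  exact Nat.lt_succ_of_le (by simpa using List.length_filter_le _ t)


def solution_alt (strArr : List String) : Int :=
  bestRun (strArr.map (fun s => (PySem.Str.len s : Int)))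

-- ===== PRECONDITION & SPEC =====
-- On the empty list both programs raise (A ValueError from max({}), B IndexError from xs[0]); Pre_ excludes exactly that input.
def Pre_solution (strArr : List String) : Prop := strArr ≠ []
instance (strArr : List String) : Decidable (Pre_solution strArr) := by unfold Pre_solution; infer_instance
def pvWitness_solution : List String := (["a", "bc", "d"])

def Spec_solution (strArr : List String) (out : Int) : Prop := out = solution_alt strArr
instance (strArr : List String) (out : Int) : Decidable (Spec_solution strArr out) := by unfold Spec_solution; infer_instance

-- ===== CLAIM (what is proved, stated in full; the proofs are below) =====
def Claim_equal_solution : Prop := ∀ (strArr : List String), Dom_solution strArr → Pre_solution strArr → Spec_solution strArr (solution strArr)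

-- ===== LEMMAS AND PROOFS =====

-- a nonempty list has a nonempty set of distinct elements
theorem pv_ofList_ne_nil (xs : List Int) (h : xs ≠ []) : (PySem.Set.ofList xs : List Int) ≠ [] := by
  cases xs with
  | nil => exact absurd rfl h
  | cons a t =>
    intro hc
    have hmem : a ∈ (PySem.Set.ofList (a :: t) : List Int) := by
      rw [PySem.Set.mem_ofList]; exact List.mem_cons_self
    rw [hc] at hmem
    simp at hmem

-- A's counting loop builds exactly PySem.Dict.counter of the lengths list.
theorem pv_loop_eq_counter (xs : List Int) :
    xs.foldl (fun d l => if d.contains l then d.insert l (d.getD l 0 + 1) else d.insert l 1)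
      (PySem.Dict.empty : PySem.Dict Int Int) = PySem.Dict.counter xs := by
  rw [← PySem.Dict.foldl_insert_getD_add_one_eq_counter]
  apply PySem.List.foldl_congr_mem
  intro d l _
  by_cases h : d.contains l
  · simp [h]
  · rw [if_neg h, PySem.Dict.getD_of_not_contains d 0 (by simpa using h)]
    norm_num

theorem bestRun_cons (v : Int) (t : List Int) :
    bestRun (v :: t) =
      if ((v :: t).filter (fun x => decide (x ≠ v))) = []
      then ((v :: t).length : Int) - (((v :: t).filter (fun x => decide (x ≠ v))).length : Int)
      else max (((v :: t).length : Int) - (((v :: t).filter (fun x => decide (x ≠ v))).length : Int))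
               (bestRun ((v :: t).filter (fun x => decide (x ≠ v)))) := by
  rw [bestRun]

theorem pv_filter_length (xs : List Int) (v : Int) :
    (xs.filter (fun x => decide (x ≠ v))).length + xs.count v = xs.length := by
  have h := List.length_eq_length_filter_add (l := xs) (fun x => decide (x ≠ v))
  have h2 : (xs.filter (fun x => !decide (x ≠ v))).length = xs.count v := by
    rw [← List.countP_eq_length_filter, List.count]
    apply List.countP_congr
    intro x _
    simp
  omega

theorem pv_best_mem (xs : List Int) (h : xs ≠ []) :
    ∃ v ∈ xs, bestRun xs = (xs.count v : Int) := by
  induction xs using bestRun.induct with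
  | case1 => exact absurd rfl h
  | case2 v t rest hrest =>
    have hrest' : (v :: t).filter (fun x => decide (x ≠ v)) = [] := hrest
    refine ⟨v, List.mem_cons_self, ?_⟩
    rw [bestRun_cons, if_pos hrest']
    have hfl := pv_filter_length (v :: t) v
    have hcnt : (v :: t).count v ≤ (v :: t).length := List.count_le_length
    rw [hrest'] at hfl ⊢
    simp only [List.length_nil] at hfl ⊢
    push_cast
    omega
  | case3 v t rest hrest ih =>
    have hrest' : ¬ (v :: t).filter (fun x => decide (x ≠ v)) = [] := hrest
    obtain ⟨w, hw, hweq⟩ := ih hrest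
    have hfl := pv_filter_length (v :: t) v
    have hcnt : (v :: t).count v ≤ (v :: t).length := List.count_le_length
    by_cases hmax : bestRun ((v :: t).filter (fun x => decide (x ≠ v))) ≤
        ((v :: t).length : Int) - (((v :: t).filter (fun x => decide (x ≠ v))).length : Int)
    · refine ⟨v, List.mem_cons_self, ?_⟩
      rw [bestRun_cons, if_neg hrest', max_eq_left hmax]
      push_cast
      omega
    · have hwv : w ≠ v := by
        have := List.of_mem_filter hw
        simpa using this
      refine ⟨w, List.mem_of_mem_filter hw, ?_⟩
      rw [bestRun_cons, if_neg hrest', max_eq_right (le_of_not_ge hmax), hweq]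
      congr 1
      rw [List.count_filter (by simp [hwv])]

theorem pv_best_ge (xs : List Int) (v : Int) (hv : v ∈ xs) :
    (xs.count v : Int) ≤ bestRun xs := by
  induction xs using bestRun.induct generalizing v with
  | case1 => simp at hv
  | case2 a t rest hrest =>
    have hrest' : (a :: t).filter (fun x => decide (x ≠ a)) = [] := hrest
    have hva : v = a := by
      by_contra hne
      have : v ∈ (a :: t).filter (fun x => decide (x ≠ a)) :=
        List.mem_filter.mpr ⟨hv, by simpa using hne⟩
      rw [hrest'] at this
      simp at this
    subst hva
    rw [bestRun_cons, if_pos hrest']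
    have hfl := pv_filter_length (v :: t) v
    have hcnt : (v :: t).count v ≤ (v :: t).length := List.count_le_length
    rw [hrest'] at hfl ⊢
    simp only [List.length_nil] at hfl ⊢
    push_cast
    omega
  | case3 a t rest hrest ih =>
    have hrest' : ¬ (a :: t).filter (fun x => decide (x ≠ a)) = [] := hrest
    rw [bestRun_cons, if_neg hrest']
    have hfl := pv_filter_length (v :: t) a
    by_cases hva : v = a
    · subst hva
      refine le_trans ?_ (le_max_left _ _)
      have hcnt : (v :: t).count v ≤ (v :: t).length := List.count_le_length
      push_cast
      omega
    · have hvr : v ∈ (a :: t).filter (fun x => decide (x ≠ a)) :=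
        List.mem_filter.mpr ⟨hv, by simpa using hva⟩
      refine le_trans ?_ (le_max_right _ _)
      have := ih v hvr
      rwa [List.count_filter (by simp [hva])] at this

theorem solution_spec : Claim_equal_solution := by
  intro strArr _ hpre
  unfold Spec_solution solution solution_alt
  set lengths : List Int := strArr.map (fun s => (PySem.Str.len s : Int)) with hlen
  have hfold : strArr.foldl (fun d s =>
      let length : Int := PySem.Str.len s
      if d.contains length then d.insert length (d.getD length 0 + 1)
      else d.insert length 1) (PySem.Dict.empty : PySem.Dict Int Int) = PySem.Dict.counter lengths := by
    rw [hlen, ← pv_loop_eq_counter, List.foldl_map]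
  simp only [hfold]
  have hne : lengths ≠ [] := by
    intro h
    exact hpre (List.map_eq_nil_iff.mp h)
  have hkeys : (PySem.Dict.counter lengths).keys = PySem.Set.ofList lengths :=
    PySem.Dict.keys_counter lengths
  have hofne : (PySem.Set.ofList lengths : List Int) ≠ [] := pv_ofList_ne_nil lengths hne
  -- A's max? is some
  obtain ⟨mA, hmA⟩ : ∃ m, PySem.List.max? (PySem.Dict.counter lengths).keys
      (fun k => (PySem.Dict.counter lengths).getD k 0) = some m := by
    cases hA : PySem.List.max? (PySem.Dict.counter lengths).keys
        (fun k => (PySem.Dict.counter lengths).getD k 0) with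
    | none => exact absurd ((PySem.List.max?_eq_none_iff ..).mp hA) (by simp [hkeys, hofne])
    | some m => exact ⟨m, rfl⟩
  rw [hmA]
  -- A's value is count mA, maximal among the counts of members
  have hmAmem : mA ∈ lengths := by
    have := PySem.List.max?_mem hmA
    rw [hkeys, PySem.Set.mem_ofList] at this
    exact this
  have hAval : (PySem.Dict.counter lengths).getD mA 0 = (lengths.count mA : Int) :=
    PySem.Dict.getD_counter ..
  show (PySem.Dict.counter lengths).getD mA 0 = bestRun lengths
  rw [hAval]
  -- B's value is count w for some member w, and dominates count mA
  obtain ⟨w, hw, hweq⟩ := pv_best_mem lengths hne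
  have h1 : (lengths.count mA : Int) ≤ bestRun lengths := pv_best_ge lengths mA hmAmem
  have h2 : bestRun lengths ≤ (lengths.count mA : Int) := by
    rw [hweq]
    have := PySem.List.max?_isMax hmA w (by rw [hkeys, PySem.Set.mem_ofList]; exact hw)
    rw [PySem.Dict.getD_counter, PySem.Dict.getD_counter] at this
    omega
  omega
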